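-- pv_equiv track=rewrite | github.com/in-sukim/Coding_Test | 프로그래머스/2/148653. 마법의 엘리베이터/마법의 엘리베이터.py | solution
-- ===== SOURCE A (Python) =====
-- def solution(storey):
--     answer = 0
--
--     while storey > 0:
--         button = storey % 10
--         if button > 5:
--             storey += (10 - button)
--             answer += (10 - button)
--         elif button < 5:
--             storey -= button
--             answer += button
--         else:
--             front_num = storey // 10
--             if front_num % 10 >= 5:
--                 storey += (10 - button)
--                 answer += (10 - button)
--             else:
--                 storey -= button
--                 answer += button
--         storey //= 10
--     return answer
-- ===== SOURCE B (Python) =====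
-- def solution(storey):
--     # Branching recursion: take the true minimum over rounding the last digit
--     # down (press it away) or up (10-d presses, carry one floor into the rest).
--     if storey <= 0:
--         return 0
--     if storey < 10:
--         return min(storey, 11 - storey)
--     d, m = storey % 10, storey // 10
--     return min(d + solution(m), 10 - d + solution(m + 1))
-- ===== Notes on version B (the rewrite author's own statement) =====
-- stated objective: alternative
-- what changed: B discards A's greedy per-digit loop and its lookahead tie-break entirely: it recurses on storey taking the true minimum over the two ways to clear the last digit (press it down, or press it up and carry one floor into the rest).
import Mathlib
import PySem

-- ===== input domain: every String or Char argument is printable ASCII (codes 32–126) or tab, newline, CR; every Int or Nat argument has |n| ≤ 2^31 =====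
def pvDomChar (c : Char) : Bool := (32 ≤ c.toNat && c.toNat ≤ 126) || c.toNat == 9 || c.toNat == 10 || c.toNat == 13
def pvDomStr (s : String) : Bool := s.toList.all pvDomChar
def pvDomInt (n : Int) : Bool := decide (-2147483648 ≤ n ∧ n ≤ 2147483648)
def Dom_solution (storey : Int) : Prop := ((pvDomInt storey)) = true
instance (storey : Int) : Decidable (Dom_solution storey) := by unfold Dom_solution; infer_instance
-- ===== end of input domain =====

-- B replaces A's greedy digit loop (with its lookahead tie-break) by a branching
-- recursion taking the minimum over rounding the last digit down or up; alternative
-- algorithm, equivalence of the return values is proved.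

-- ===== PORT A =====
-- A's while-loop: greedy per digit; storey is rounded up or down, then floor-divided.
-- The Nat fuel only makes the loop total; storey.toNat iterations always suffice
-- (proved in loopA_fuel below), so the guard never changes the computed value.
def solutionLoopA (fuel : Nat) (storey answer : Int) : Int :=
  match fuel with
  | 0 => answer
  | f + 1 =>
    if storey > 0 then
      if PySem.Int.mod storey 10 > 5 then
        solutionLoopA f (PySem.Int.floordiv (storey + (10 - PySem.Int.mod storey 10)) 10)
          (answer + (10 - PySem.Int.mod storey 10))
      else if PySem.Int.mod storey 10 < 5 then
        solutionLoopA f (PySem.Int.floordiv (storey - PySem.Int.mod storey 10) 10)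
          (answer + PySem.Int.mod storey 10)
      else
        if PySem.Int.mod (PySem.Int.floordiv storey 10) 10 ≥ 5 then
          solutionLoopA f (PySem.Int.floordiv (storey + (10 - PySem.Int.mod storey 10)) 10)
            (answer + (10 - PySem.Int.mod storey 10))
        else
          solutionLoopA f (PySem.Int.floordiv (storey - PySem.Int.mod storey 10) 10)
            (answer + PySem.Int.mod storey 10)
    else answer

def solution (storey : Int) : Int := solutionLoopA storey.toNat storey 0

-- ===== PORT B =====
-- B's recursion: the minimum over pressing the last digit away (d presses) or
-- rounding it up (10 - d presses and one extra floor carried into the rest).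
-- The Nat fuel only makes the recursion total; storey.toNat levels always suffice.
def solutionAltGo (fuel : Nat) (storey : Int) : Int :=
  match fuel with
  | 0 => 0
  | f + 1 =>
    if storey ≤ 0 then 0
    else if storey < 10 then min storey (11 - storey)
    else
      min (PySem.Int.mod storey 10 + solutionAltGo f (PySem.Int.floordiv storey 10))
          (10 - PySem.Int.mod storey 10 + solutionAltGo f (PySem.Int.floordiv storey 10 + 1))

def solution_alt (storey : Int) : Int := solutionAltGo storey.toNat storey

-- ===== PRECONDITION & SPEC =====
def Spec_solution (storey : Int) (out : Int) : Prop := out = solution_alt storey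
instance (storey : Int) (out : Int) : Decidable (Spec_solution storey out) := by unfold Spec_solution; infer_instance

-- ===== CLAIM (what is proved, stated in full; the proofs are below) =====
def Claim_equal_solution : Prop := ∀ (storey : Int), Dom_solution storey → Spec_solution storey (solution storey)

-- ===== LEMMAS AND PROOFS =====

-- A's loop returns the accumulator whatever the fuel once storey ≤ 0
lemma loopA_exit {s : Int} (h : s ≤ 0) (f : ℕ) (a : Int) : solutionLoopA f s a = a := by
  cases f with
  | zero => rfl
  | succ f => simp only [solutionLoopA]; rw [if_neg (by omega)]

-- one unfolding of A's loop at positive storey, the rounded storeys simplified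
lemma loopA_succ {s : Int} (h : 0 < s) (f : ℕ) (a : Int) :
    solutionLoopA (f + 1) s a =
      if s % 10 > 5 then solutionLoopA f (s / 10 + 1) (a + (10 - s % 10))
      else if s % 10 < 5 then solutionLoopA f (s / 10) (a + s % 10)
      else if (s / 10) % 10 ≥ 5 then solutionLoopA f (s / 10 + 1) (a + (10 - s % 10))
      else solutionLoopA f (s / 10) (a + s % 10) := by
  simp only [solutionLoopA,
    PySem.Int.floordiv_eq_ediv_of_pos (by norm_num : (0:Int) < 10),
    PySem.Int.mod_eq_emod_of_pos (by norm_num : (0:Int) < 10)]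
  rw [if_pos (show s > 0 from h),
    show (s + (10 - s % 10)) / 10 = s / 10 + 1 by omega,
    show (s - s % 10) / 10 = s / 10 by omega]

-- any fuel ≥ storey.toNat computes the same value of A's loop
lemma loopA_fuel (n : ℕ) : ∀ (f g : ℕ) (s a : Int), s.toNat ≤ f → s.toNat ≤ g →
    s.toNat ≤ n → solutionLoopA f s a = solutionLoopA g s a := by
  induction n with
  | zero =>
    intro f g s a _ _ hn
    rw [loopA_exit (by omega), loopA_exit (by omega)]
  | succ n ih =>
    intro f g s a hf hg hn
    by_cases hs : s ≤ 0
    · rw [loopA_exit hs, loopA_exit hs]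
    · obtain ⟨f', rfl⟩ : ∃ f', f = f' + 1 := ⟨f - 1, by omega⟩
      obtain ⟨g', rfl⟩ : ∃ g', g = g' + 1 := ⟨g - 1, by omega⟩
      rw [loopA_succ (by omega) f' a, loopA_succ (by omega) g' a]
      split_ifs with h1 h2 h3
      · exact ih f' g' _ _ (by omega) (by omega) (by omega)
      · exact ih f' g' _ _ (by omega) (by omega) (by omega)
      · exact ih f' g' _ _ (by omega) (by omega) (by omega)
      · exact ih f' g' _ _ (by omega) (by omega) (by omega)

-- B's value at or below zero, whatever the fuel
lemma altGo_nonpos {s : Int} (h : s ≤ 0) (f : ℕ) : solutionAltGo f s = 0 := by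
  cases f with
  | zero => rfl
  | succ f => simp only [solutionAltGo]; rw [if_pos h]

-- one unfolding of B's recursion: the single-digit case …
lemma altGo_small {s : Int} (h : 0 < s) (h10 : s < 10) (f : ℕ) :
    solutionAltGo (f + 1) s = min s (11 - s) := by
  simp only [solutionAltGo]
  rw [if_neg (by omega), if_pos h10]

-- … and the multi-digit case
lemma altGo_succ {s : Int} (h10 : 10 ≤ s) (f : ℕ) :
    solutionAltGo (f + 1) s =
      min (s % 10 + solutionAltGo f (s / 10))
          (10 - s % 10 + solutionAltGo f (s / 10 + 1)) := by
  simp only [solutionAltGo,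
    PySem.Int.floordiv_eq_ediv_of_pos (by norm_num : (0:Int) < 10),
    PySem.Int.mod_eq_emod_of_pos (by norm_num : (0:Int) < 10)]
  rw [if_neg (by omega), if_neg (by omega)]

-- any fuel ≥ storey.toNat computes the same value of B's recursion
lemma altGo_fuel (n : ℕ) : ∀ (f g : ℕ) (s : Int), s.toNat ≤ f → s.toNat ≤ g →
    s.toNat ≤ n → solutionAltGo f s = solutionAltGo g s := by
  induction n with
  | zero =>
    intro f g s _ _ hn
    rw [altGo_nonpos (by omega), altGo_nonpos (by omega)]
  | succ n ih =>
    intro f g s hf hg hn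
    by_cases hs : s ≤ 0
    · rw [altGo_nonpos hs, altGo_nonpos hs]
    · obtain ⟨f', rfl⟩ : ∃ f', f = f' + 1 := ⟨f - 1, by omega⟩
      obtain ⟨g', rfl⟩ : ∃ g', g = g' + 1 := ⟨g - 1, by omega⟩
      by_cases h10 : s < 10
      · rw [altGo_small (by omega) h10, altGo_small (by omega) h10]
      · rw [altGo_succ (by omega) f', altGo_succ (by omega) g',
          ih f' g' (s / 10) (by omega) (by omega) (by omega),
          ih f' g' (s / 10 + 1) (by omega) (by omega) (by omega)]

lemma alt_nonpos {s : Int} (h : s ≤ 0) : solution_alt s = 0 := altGo_nonpos h _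

lemma alt_one : solution_alt 1 = 1 := by decide

-- uniform one-step formula for B (at the wrapper level), valid for every positive input
lemma alt_step {s : Int} (h : 0 < s) :
    solution_alt s = min (s % 10 + solution_alt (s / 10))
                         (10 - s % 10 + solution_alt (s / 10 + 1)) := by
  unfold solution_alt
  obtain ⟨t, ht⟩ : ∃ t, s.toNat = t + 1 := ⟨s.toNat - 1, by omega⟩
  rw [ht]
  by_cases h10 : s < 10
  · rw [altGo_small h h10]
    have hm : s / 10 = 0 := by omega
    have hmod : s % 10 = s := by omega
    rw [hm, hmod, altGo_nonpos (le_refl 0),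
      show (0:Int) + 1 = 1 from rfl,
      show solutionAltGo (Int.toNat 1) 1 = 1 by decide]
    omega
  · rw [altGo_succ (by omega) t,
      altGo_fuel s.toNat t ((s / 10).toNat) (s / 10) (by omega) (by omega) (by omega),
      altGo_fuel s.toNat t ((s / 10 + 1).toNat) (s / 10 + 1) (by omega) (by omega) (by omega)]

-- one unfolding of A's loop (at the wrapper level)
lemma loopA_step {s : Int} (h : 0 < s) (a : Int) :
    solutionLoopA s.toNat s a =
      if s % 10 > 5 then solutionLoopA (s / 10 + 1).toNat (s / 10 + 1) (a + (10 - s % 10))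
      else if s % 10 < 5 then solutionLoopA (s / 10).toNat (s / 10) (a + s % 10)
      else if (s / 10) % 10 ≥ 5 then solutionLoopA (s / 10 + 1).toNat (s / 10 + 1) (a + (10 - s % 10))
      else solutionLoopA (s / 10).toNat (s / 10) (a + s % 10) := by
  obtain ⟨t, ht⟩ : ∃ t, s.toNat = t + 1 := ⟨s.toNat - 1, by omega⟩
  rw [ht, loopA_succ h t a]
  split_ifs with h1 h2 h3
  · exact loopA_fuel s.toNat t ((s / 10 + 1).toNat) _ _ (by omega) (by omega) (by omega)
  · exact loopA_fuel s.toNat t ((s / 10).toNat) _ _ (by omega) (by omega) (by omega)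
  · exact loopA_fuel s.toNat t ((s / 10 + 1).toNat) _ _ (by omega) (by omega) (by omega)
  · exact loopA_fuel s.toNat t ((s / 10).toNat) _ _ (by omega) (by omega) (by omega)

-- main invariant: A's loop equals accumulator plus B's value; moreover B is 1-Lipschitz
-- and moves with the last digit's rounding direction (this yields A's tie-break).
lemma main_inv (N : ℕ) : ∀ s : Int, s.toNat ≤ N →
    ((∀ a : Int, solutionLoopA s.toNat s a = a + solution_alt s) ∧
     (solution_alt (s + 1) ≤ solution_alt s + 1 ∧
      solution_alt s ≤ solution_alt (s + 1) + 1) ∧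
     (s % 10 ≥ 5 → solution_alt (s + 1) ≤ solution_alt s) ∧
     (s % 10 < 5 → solution_alt s ≤ solution_alt (s + 1))) := by
  induction N with
  | zero =>
    intro s hs
    have hs0 : s ≤ 0 := by omega
    have c0 : solution_alt s = 0 := alt_nonpos hs0
    by_cases h1 : s + 1 ≤ 0
    · have c1 : solution_alt (s + 1) = 0 := alt_nonpos h1
      refine ⟨fun a => ?_, by omega, by omega, by omega⟩
      rw [loopA_exit hs0, c0]; ring
    · have hse : s = 0 := by omega
      subst hse
      rw [show (0:Int) + 1 = 1 from rfl, alt_one]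
      refine ⟨fun a => ?_, by omega, by omega, by omega⟩
      rw [loopA_exit (le_refl 0), c0]; ring
  | succ N ih =>
    intro s hs
    by_cases hle : s.toNat ≤ N
    · exact ih s hle
    have hpos : 0 < s := by omega
    have ihm := ih (s / 10) (by omega)
    have hstep := alt_step hpos
    have lipm := ihm.2.1
    constructor
    · -- A's loop = accumulator + B
      intro a
      rw [loopA_step hpos a]
      split_ifs with h1 h2 h3
      · -- digit > 5: round up; B's min is the up branch
        have ihm1 := ih (s / 10 + 1) (by omega)
        rw [ihm1.1]
        omega
      · -- digit < 5: round down; B's min is the down branch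
        rw [ihm.1]
        omega
      · -- middle digit, next digit high: round up; the tie is broken by B's monotonicity
        have ihm1 := ih (s / 10 + 1) (by omega)
        have mono := ihm.2.2.1 h3
        rw [ihm1.1]
        omega
      · -- middle digit, next digit low: round down
        have mono := ihm.2.2.2 (by omega)
        rw [ihm.1]
        omega
    · -- Lipschitz and direction facts at s
      by_cases h9 : s % 10 = 9
      · have e2 : (s + 1) / 10 = s / 10 + 1 := by omega
        have e1 : (s + 1) % 10 = 0 := by omega
        have hstep1 : solution_alt (s + 1) =
            min (0 + solution_alt (s / 10 + 1)) (10 + solution_alt (s / 10 + 1 + 1)) := by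
          rw [alt_step (by omega : (0:Int) < s + 1), e1, e2]
          norm_num
        have ihm1 := ih (s / 10 + 1) (by omega)
        have lipm1 := ihm1.2.1
        refine ⟨⟨by omega, by omega⟩, fun _ => by omega, fun hlt => by omega⟩
      · have e2 : (s + 1) / 10 = s / 10 := by omega
        have e1 : (s + 1) % 10 = s % 10 + 1 := by omega
        have hstep1 : solution_alt (s + 1) =
            min (s % 10 + 1 + solution_alt (s / 10))
                (10 - (s % 10 + 1) + solution_alt (s / 10 + 1)) := by
          rw [alt_step (by omega : (0:Int) < s + 1), e1, e2]
        refine ⟨⟨by omega, by omega⟩, fun hge => by omega, fun hlt => by omega⟩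

-- ===== VERDICT (by name: the statement is the Claim_ definition above) =====
theorem solution_spec : Claim_equal_solution := by
  intro storey _
  unfold Spec_solution solution
  rw [(main_inv storey.toNat storey (le_refl _)).1 0]
  ring
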